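-- pv_equiv track=rewrite | github.com/Orderlee/pipeline | src/vlm_pipeline/resources/duckdb_phash.py | _phash_prefix_candidates
-- ===== SOURCE A (Python) =====
-- from itertools import combinations
--
-- def _phash_prefix_candidates(phash_hex: str, threshold: int, prefix_hex_len: int = 2) -> list[str]:
--     """prefix hamming prefilter 후보(prefix) 생성."""
--     if not phash_hex:
--         return []
--     normalized = str(phash_hex).strip().lower()
--     prefix_hex_len = max(1, min(4, int(prefix_hex_len)))
--     prefix = normalized[:prefix_hex_len]
--     if len(prefix) < prefix_hex_len:
--         return []
--
--     try:
--         base = int(prefix, 16)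
--     except ValueError:
--         return []
--
--     total_bits = prefix_hex_len * 4
--     max_flip = max(0, min(int(threshold), total_bits))
--     all_count = 1 << total_bits
--     if max_flip >= total_bits:
--         return [f"{value:0{prefix_hex_len}x}" for value in range(all_count)]
--
--     values: set[int] = set()
--     for flip_count in range(max_flip + 1):
--         for bit_positions in combinations(range(total_bits), flip_count):
--             candidate = base
--             for pos in bit_positions:
--                 candidate ^= 1 << pos
--             values.add(candidate)
--
--     return [f"{value:0{prefix_hex_len}x}" for value in sorted(values)]
-- ===== SOURCE B (Python) =====
-- def _phash_prefix_candidates(phash_hex: str, threshold: int, prefix_hex_len: int = 2) -> list[str]: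
--     """prefix hamming prefilter candidates, via one linear scan of the prefix value space."""
--     if not phash_hex:
--         return []
--     n = max(1, min(4, int(prefix_hex_len)))
--     prefix = str(phash_hex).strip().lower()[:n]
--     if len(prefix) < n:
--         return []
--     try:
--         base = int(prefix, 16)
--     except ValueError:
--         return []
--     bits = 4 * n
--     flips = max(0, min(int(threshold), bits))
--     if flips >= bits:
--         return [format(v, f"0{n}x") for v in range(1 << bits)]
--     masks = sorted(base ^ m for m in range(1 << bits) if m.bit_count() <= flips)
--     return [format(v, f"0{n}x") for v in masks]
-- ===== Notes on version B (the rewrite author's own statement) =====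
-- stated objective: simpler
-- what changed: A enumerates combinations of bit positions for every flip count, xors each subset into the base and collects the results in a set before sorting; B makes one linear scan of the whole prefix value space, keeping base ^ m for every mask m with popcount <= flips, then sorts.
import Mathlib
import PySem

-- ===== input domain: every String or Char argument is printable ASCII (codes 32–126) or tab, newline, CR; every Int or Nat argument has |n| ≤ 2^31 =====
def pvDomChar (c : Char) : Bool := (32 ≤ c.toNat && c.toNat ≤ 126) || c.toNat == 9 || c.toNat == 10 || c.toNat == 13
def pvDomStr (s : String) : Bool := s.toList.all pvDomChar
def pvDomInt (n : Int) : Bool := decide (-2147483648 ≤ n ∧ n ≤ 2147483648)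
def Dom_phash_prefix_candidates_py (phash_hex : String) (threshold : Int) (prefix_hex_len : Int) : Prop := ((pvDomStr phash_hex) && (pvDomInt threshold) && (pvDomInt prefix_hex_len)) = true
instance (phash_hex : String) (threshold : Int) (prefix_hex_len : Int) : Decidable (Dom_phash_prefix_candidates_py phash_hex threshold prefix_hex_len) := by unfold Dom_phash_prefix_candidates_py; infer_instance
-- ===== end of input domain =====

-- B replaces A's nested combinations-over-bit-positions enumeration into a set by one linear
-- scan of the prefix value space (filter by popcount, then sort); objective: simpler, not faster.

-- ===== PORT A =====
-- f"{v:0{w}x}" / format(v, f"0{w}x"): lowercase hex digits of |v|, '-' in front for negatives,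
-- zero-padded to width w with the sign kept in front (exactly str.zfill). Shared by both ports
-- because both Python sources use the identical format spec.
def pvHexDigit (n : Nat) : Char := if n < 10 then Char.ofNat (48 + n) else Char.ofNat (87 + n)

def pvHexChars (n : Nat) : List Char :=
  if _h : n < 16 then [pvHexDigit n]
  else pvHexChars (n / 16) ++ [pvHexDigit (n % 16)]
  decreasing_by exact Nat.div_lt_self (by omega) (by omega)

def pvFmtHex (v : Int) (w : Int) : String :=
  PySem.Str.zfill (String.ofList (if v < 0 then '-' :: pvHexChars (-v).toNat else pvHexChars v.toNat)) w

-- the candidate-set loop of A: for flip_count in range(max_flip + 1): for bit_positions in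
-- combinations(range(total_bits), flip_count): candidate = base; for pos: candidate ^= 1 << pos;
-- values.add(candidate)
def pvValuesA (base : Int) (total_bits : Int) (max_flip : Int) : PySem.Set Int :=
  (PySem.List.pyRange 0 (max_flip + 1)).foldl (fun vs fc =>
    (PySem.List.combinations (PySem.List.pyRange 0 total_bits) fc.toNat).foldl (fun vs2 bp =>
      PySem.Set.add vs2 (bp.foldl (fun cand pos => PySem.Int.bxor cand ((1 : Int) <<< pos.toNat)) base)) vs)
    PySem.Set.empty

def phash_prefix_candidates_py (phash_hex : String) (threshold : Int) (prefix_hex_len : Int) : List String :=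
  if phash_hex = "" then []
  else
    let normalized := PySem.Str.lower (PySem.Str.strip phash_hex)
    let phl : Int := max 1 (min 4 prefix_hex_len)
    let pfx := PySem.Str.slice normalized none (some phl)
    if PySem.Str.len pfx < phl then []
    else
      match PySem.Int.ofStrBase? pfx 16 with
      | none => []
      | some base =>
        let total_bits := phl * 4
        let max_flip := max 0 (min threshold total_bits)
        let all_count : Int := (1 : Int) <<< total_bits.toNat
        if total_bits ≤ max_flip then
          (PySem.List.pyRange 0 all_count).map (fun v => pvFmtHex v phl)
        else
          (PySem.List.sorted (pvValuesA base total_bits max_flip) (fun x => x)).map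
            (fun v => pvFmtHex v phl)

-- ===== PORT B =====
-- masks = sorted(base ^ m for m in range(1 << bits) if m.bit_count() <= flips)
def pvMasksB (base : Int) (bits : Int) (flips : Int) : List Int :=
  PySem.List.sorted
    (((PySem.List.pyRange 0 ((1 : Int) <<< bits.toNat)).filter
        (fun m => decide ((PySem.Int.bitCount m : Int) ≤ flips))).map
      (fun m => PySem.Int.bxor base m))
    (fun x => x)

def phash_prefix_candidates_py_alt (phash_hex : String) (threshold : Int) (prefix_hex_len : Int) : List String :=
  if phash_hex = "" then []
  else
    let n : Int := max 1 (min 4 prefix_hex_len)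
    let pfx := PySem.Str.slice (PySem.Str.lower (PySem.Str.strip phash_hex)) none (some n)
    if PySem.Str.len pfx < n then []
    else
      match PySem.Int.ofStrBase? pfx 16 with
      | none => []
      | some base =>
        let bits := 4 * n
        let flips := max 0 (min threshold bits)
        if bits ≤ flips then
          (PySem.List.pyRange 0 ((1 : Int) <<< bits.toNat)).map (fun v => pvFmtHex v n)
        else
          (pvMasksB base bits flips).map (fun v => pvFmtHex v n)

-- ===== PRECONDITION & SPEC =====
def Spec_phash_prefix_candidates_py (phash_hex : String) (threshold : Int) (prefix_hex_len : Int) (out : List String) : Prop := out = phash_prefix_candidates_py_alt phash_hex threshold prefix_hex_len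
instance (phash_hex : String) (threshold : Int) (prefix_hex_len : Int) (out : List String) : Decidable (Spec_phash_prefix_candidates_py phash_hex threshold prefix_hex_len out) := by unfold Spec_phash_prefix_candidates_py; infer_instance

-- ===== CLAIM (what is proved, stated in full; the proofs are below) =====
def Claim_equal_phash_prefix_candidates_py : Prop := ∀ (phash_hex : String) (threshold : Int) (prefix_hex_len : Int), Dom_phash_prefix_candidates_py phash_hex threshold prefix_hex_len → Spec_phash_prefix_candidates_py phash_hex threshold prefix_hex_len (phash_prefix_candidates_py phash_hex threshold prefix_hex_len)

-- ===== LEMMAS AND PROOFS =====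

-- ---- PySem.Int.bxor facts restricted to a Nat right argument ----
lemma pvBxorNonneg (b : Int) (hb : 0 ≤ b) (y : Nat) :
    PySem.Int.bxor b (y : Int) = ((b.toNat ^^^ y : Nat) : Int) := by
  unfold PySem.Int.bxor
  rw [if_pos hb, if_pos (Int.natCast_nonneg y), Int.toNat_natCast]

lemma pvBxorNeg (b : Int) (hb : b < 0) (y : Nat) :
    PySem.Int.bxor b (y : Int) = -(((-b - 1).toNat ^^^ y : Nat) : Int) - 1 := by
  unfold PySem.Int.bxor
  rw [if_neg (by omega), if_pos (Int.natCast_nonneg y), Int.toNat_natCast]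

lemma pvBxorAssocNat (a : Int) (x y : Nat) :
    PySem.Int.bxor (PySem.Int.bxor a (x : Int)) (y : Int) = PySem.Int.bxor a ((x ^^^ y : Nat) : Int) := by
  by_cases ha : 0 ≤ a
  · rw [pvBxorNonneg a ha, pvBxorNonneg a ha, pvBxorNonneg _ (Int.natCast_nonneg _), Int.toNat_natCast,
      Nat.xor_assoc]
  · have hx : PySem.Int.bxor a (x : Int) = -((((-a - 1).toNat ^^^ x : Nat)) : Int) - 1 :=
      pvBxorNeg a (by omega) x
    rw [hx, pvBxorNeg _ (by omega), pvBxorNeg a (by omega)]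
    have ht : (-(-((((-a - 1).toNat ^^^ x : Nat)) : Int) - 1) - 1).toNat = (-a - 1).toNat ^^^ x := by
      omega
    rw [ht, Nat.xor_assoc]

lemma pvBxorCancel (a : Int) (x : Nat) :
    PySem.Int.bxor (PySem.Int.bxor a (x : Int)) (x : Int) = a := by
  rw [pvBxorAssocNat]
  simp [PySem.Int.bxor_zero]

lemma pvBxorEqSelf (a : Int) (k : Nat) (h : PySem.Int.bxor a (k : Int) = a) : k = 0 := by
  by_cases ha : 0 ≤ a
  · rw [pvBxorNonneg a ha] at h
    have : a.toNat ^^^ k = a.toNat := by omega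
    have h3 := congrArg (fun z => a.toNat ^^^ z) this
    simpa [← Nat.xor_assoc, eq_comm] using h3.symm
  · rw [pvBxorNeg a (by omega)] at h
    have : (-a - 1).toNat ^^^ k = (-a - 1).toNat := by omega
    have h3 := congrArg (fun z => (-a - 1).toNat ^^^ z) this
    simpa [← Nat.xor_assoc, eq_comm] using h3.symm

lemma pvBxorInjNat (base : Int) {x y : Nat}
    (h : PySem.Int.bxor base (x : Int) = PySem.Int.bxor base (y : Int)) : x = y := by
  have h2 := congrArg (fun z => PySem.Int.bxor z (y : Int)) h
  simp only [pvBxorCancel] at h2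
  rw [pvBxorAssocNat] at h2
  have h4 := pvBxorEqSelf base (x ^^^ y) h2
  have h5 := congrArg (fun z => z ^^^ y) h4
  simpa [Nat.xor_assoc] using h5

-- ---- PySem.Int.bitCount on Nat casts ----
lemma pvXorPow (n : Nat) : ∀ m : Nat, m < 2 ^ n → m ^^^ 2 ^ n = m + 2 ^ n := by
  induction n with
  | zero => intro m hm; interval_cases m; decide
  | succ n ih =>
    intro m hm
    have h2 : 2 ^ (n+1) = 2 * 2 ^ n := by ring
    have hd : (m ^^^ 2 ^ (n+1)) / 2 = m / 2 + 2 ^ n := by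
      rw [Nat.xor_div_two]
      have he : 2 ^ (n+1) / 2 = 2 ^ n := by omega
      rw [he, ih (m / 2) (by omega)]
    have hmod : (m ^^^ 2 ^ (n+1)) % 2 = (m + 2 ^ (n+1)) % 2 := Nat.xor_mod_two_eq
    have hx := Nat.div_add_mod (m ^^^ 2 ^ (n+1)) 2
    have hy := Nat.div_add_mod m 2
    omega

lemma pvBcSplit (m : Nat) :
    PySem.Int.bitCount (m : Int) = m % 2 + PySem.Int.bitCount ((m / 2 : Nat) : Int) := by
  rcases Nat.eq_zero_or_pos m with h | h
  · subst h; simp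
  · exact PySem.Int.bitCount_natCast h

lemma pvBcAddPow (n : Nat) : ∀ m : Nat, m < 2 ^ n →
    PySem.Int.bitCount ((m + 2 ^ n : Nat) : Int) = PySem.Int.bitCount (m : Int) + 1 := by
  induction n with
  | zero =>
    intro m hm
    interval_cases m
    · norm_num
      decide
  | succ n ih =>
    intro m hm
    have h2 : 2 ^ (n+1) = 2 * 2 ^ n := by ring
    have ha := pvBcSplit (m + 2 ^ (n+1))
    have hdiv : (m + 2 ^ (n+1)) / 2 = m / 2 + 2 ^ n := by omega
    have hmod : (m + 2 ^ (n+1)) % 2 = m % 2 := by omega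
    rw [hdiv, hmod, ih (m / 2) (by omega)] at ha
    have hb := pvBcSplit m
    omega

-- ---- the Nat-level mask determined by a list of bit positions ----
def pvMask (d : List Nat) : Nat := d.foldl (fun m p => m ^^^ (1 <<< p)) 0

lemma pvShiftCast (p : Nat) : ((1 : Int) <<< ((p : Nat) : Int)) = ((1 <<< p : Nat) : Int) := by
  rw [show (1 : Int) = ((1 : Nat) : Int) by norm_num, Int.shiftLeft_natCast]

lemma pvCandShift (d : List Nat) : ∀ (a : Int) (acc : Nat),
    (d.map (Nat.cast : Nat → Int)).foldl (fun cand pos => PySem.Int.bxor cand ((1 : Int) <<< pos.toNat)) (PySem.Int.bxor a (acc : Int))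
      = PySem.Int.bxor a ((d.foldl (fun m p => m ^^^ (1 <<< p)) acc : Nat) : Int) := by
  induction d with
  | nil => intro a acc; simp
  | cons p d ih =>
    intro a acc
    rw [List.map_cons, List.foldl_cons, Int.toNat_natCast, pvShiftCast, pvBxorAssocNat]
    exact ih a (acc ^^^ 1 <<< p)

lemma pvCandEq (d : List Nat) (a : Int) :
    (d.map (Nat.cast : Nat → Int)).foldl (fun cand pos => PySem.Int.bxor cand ((1 : Int) <<< pos.toNat)) a
      = PySem.Int.bxor a ((pvMask d : Nat) : Int) := by
  have h := pvCandShift d a 0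
  simpa [PySem.Int.bxor_zero, pvMask] using h

lemma pvMaskAppend (d : List Nat) (p : Nat) : pvMask (d ++ [p]) = pvMask d ^^^ (1 <<< p) := by
  simp [pvMask, List.foldl_append]

lemma pvMaskBound (n : Nat) : ∀ d : List Nat, d.Sublist (List.range n) →
    pvMask d < 2 ^ n ∧ PySem.Int.bitCount ((pvMask d : Nat) : Int) = d.length := by
  induction n with
  | zero =>
    intro d hd
    simp only [List.range_zero, List.sublist_nil] at hd
    subst hd
    exact ⟨by simp [pvMask], by simp [pvMask]⟩
  | succ n ih =>
    intro d hd
    rw [List.range_succ, List.sublist_append_iff] at hd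
    obtain ⟨d1, d2, rfl, h1, h2⟩ := hd
    rcases List.sublist_singleton.mp h2 with rfl | rfl
    · simp only [List.append_nil]
      obtain ⟨hlt, hbc⟩ := ih d1 h1
      exact ⟨hlt.trans_le (Nat.pow_le_pow_right (by norm_num) (by omega)), hbc⟩
    · obtain ⟨hlt, hbc⟩ := ih d1 h1
      rw [pvMaskAppend, Nat.one_shiftLeft, pvXorPow n _ hlt]
      constructor
      · have : 2 ^ (n+1) = 2 ^ n + 2 ^ n := by ring
        omega
      · rw [pvBcAddPow n _ hlt, hbc]
        simp

lemma pvMaskSurj (n : Nat) : ∀ m : Nat, m < 2 ^ n →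
    ∃ d : List Nat, d.Sublist (List.range n) ∧ pvMask d = m ∧
      d.length = PySem.Int.bitCount ((m : Nat) : Int) := by
  induction n with
  | zero =>
    intro m hm
    have hz : m = 0 := by omega
    subst hz
    exact ⟨[], by simp, by simp [pvMask], by simp⟩
  | succ n ih =>
    intro m hm
    by_cases hsm : m < 2 ^ n
    · obtain ⟨d, hd, hmask, hlen⟩ := ih m hsm
      exact ⟨d, hd.trans (by rw [List.range_succ]; exact List.sublist_append_left _ _), hmask, hlen⟩
    · have h1 : m - 2 ^ n < 2 ^ n := by
        have : 2 ^ (n+1) = 2 ^ n + 2 ^ n := by ring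
        omega
      obtain ⟨d, hd, hmask, hlen⟩ := ih (m - 2 ^ n) h1
      refine ⟨d ++ [n], ?_, ?_, ?_⟩
      · rw [List.range_succ]
        exact hd.append (List.Sublist.refl _)
      · rw [pvMaskAppend, hmask, Nat.one_shiftLeft, pvXorPow n _ h1]
        omega
      · have hm' : m = (m - 2 ^ n) + 2 ^ n := by omega
        rw [List.length_append, hlen, hm', pvBcAddPow n _ h1]
        simp

-- ---- A's double foldl of Set.add is Set.ofList of the flattened candidate list ----
lemma pvSetFoldUpdate (l : List Int) (g : Int → List (List Int)) (f : List Int → Int) :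
    ∀ s : PySem.Set Int,
    l.foldl (fun vs x => (g x).foldl (fun vs2 bp => PySem.Set.add vs2 (f bp)) vs) s
      = PySem.Set.update s (l.flatMap (fun x => (g x).map f)) := by
  induction l with
  | nil => intro s; simp [PySem.Set.update]
  | cons x l ih =>
    intro s
    rw [List.foldl_cons, ih, List.flatMap_cons]
    unfold PySem.Set.update
    rw [List.foldl_append, List.foldl_map]

lemma pvSetFold (l : List Int) (g : Int → List (List Int)) (f : List Int → Int) :
    l.foldl (fun vs x => (g x).foldl (fun vs2 bp => PySem.Set.add vs2 (f bp)) vs) PySem.Set.empty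
      = PySem.Set.ofList (l.flatMap (fun x => (g x).map f)) := by
  rw [pvSetFoldUpdate, PySem.Set.ofList_eq_foldl]
  rfl

lemma pvShiftTwoPow (tbn : Nat) : ((1 : Int) <<< ((tbn : Int)).toNat) = ((2 ^ tbn : Nat) : Int) := by
  rw [Int.toNat_natCast, show (1 : Int) = ((1 : Nat) : Int) by norm_num, ← Int.natCast_shiftLeft,
    Nat.shiftLeft_eq, one_mul]

-- the two generators produce the same sorted candidate-value list
lemma pvGenEq (base : Int) (tbn : Nat) (F : Int) :
    PySem.List.sorted (pvValuesA base (tbn : Int) F) (fun x => x) = pvMasksB base (tbn : Int) F := by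
  unfold pvValuesA pvMasksB
  rw [pvSetFold (g := fun fc => PySem.List.combinations (PySem.List.pyRange 0 (tbn : Int)) fc.toNat)
      (f := fun bp => bp.foldl (fun cand pos => PySem.Int.bxor cand ((1 : Int) <<< pos.toNat)) base)]
  rw [PySem.List.sorted_id_eq_sorted_id_iff_perm]
  rw [List.perm_ext_iff_of_nodup (PySem.Set.nodup_ofList _) ?nodup]
  case nodup =>
    apply List.Nodup.map_on
    · intro a ha b hb hab
      have ha' := (List.mem_filter.mp ha).1
      have hb' := (List.mem_filter.mp hb).1
      have ha0 : 0 ≤ a := (PySem.List.mem_pyRange_one.mp ha').1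
      have hb0 : 0 ≤ b := (PySem.List.mem_pyRange_one.mp hb').1
      have : a.toNat = b.toNat := by
        apply pvBxorInjNat base
        rwa [Int.toNat_of_nonneg ha0, Int.toNat_of_nonneg hb0]
      omega
    · exact List.Nodup.filter _ (by
        rw [pvShiftTwoPow, PySem.List.pyRange_zero_natCast]
        exact (List.nodup_range).map (fun x y h => by exact_mod_cast h))
  intro v
  rw [PySem.Set.mem_ofList, List.mem_flatMap]
  constructor
  · rintro ⟨fc, hfc, hv⟩
    rw [List.mem_map] at hv
    obtain ⟨bp, hbp, hcand⟩ := hv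
    rw [PySem.List.mem_combinations_iff] at hbp
    obtain ⟨hsub, hlen⟩ := hbp
    rw [PySem.List.pyRange_zero_natCast] at hsub
    have hsub' : bp.Sublist (List.map (Nat.cast : Nat → Int) (List.range tbn)) := hsub
    rw [List.sublist_map_iff] at hsub'
    obtain ⟨d, hd, rfl⟩ := hsub'
    obtain ⟨hmlt, hmbc⟩ := pvMaskBound tbn d hd
    rw [pvCandEq] at hcand
    rw [List.mem_map]
    refine ⟨((pvMask d : Nat) : Int), ?_, hcand⟩
    rw [List.mem_filter]
    constructor
    · rw [pvShiftTwoPow, PySem.List.pyRange_zero_natCast]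
      exact List.mem_map.mpr ⟨pvMask d, List.mem_range.mpr hmlt, rfl⟩
    · rw [decide_eq_true_eq, hmbc]
      have h1 : (0 : Int) ≤ fc := (PySem.List.mem_pyRange_one.mp hfc).1
      have h2 : fc < F + 1 := (PySem.List.mem_pyRange_one.mp hfc).2
      simp only [List.length_map] at hlen
      have h3 : (d.length : Int) = fc := by omega
      omega
  · intro hv
    rw [List.mem_map] at hv
    obtain ⟨mi, hmi, hcand⟩ := hv
    rw [List.mem_filter] at hmi
    obtain ⟨hmem, hbc⟩ := hmi
    rw [pvShiftTwoPow, PySem.List.pyRange_zero_natCast, List.mem_map] at hmem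
    obtain ⟨mn, hmn, rfl⟩ := hmem
    rw [List.mem_range] at hmn
    rw [decide_eq_true_eq] at hbc
    obtain ⟨d, hd, hmask, hlen⟩ := pvMaskSurj tbn mn hmn
    refine ⟨(d.length : Int), ?_, ?_⟩
    · rw [PySem.List.mem_pyRange_one]
      refine ⟨by positivity, ?_⟩
      have h4 : (d.length : Int) ≤ F := by rw [hlen]; exact_mod_cast hbc
      omega
    · rw [List.mem_map]
      refine ⟨d.map (Nat.cast : Nat → Int), ?_, ?_⟩
      · rw [PySem.List.mem_combinations_iff]
        refine ⟨?_, ?_⟩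
        · rw [PySem.List.pyRange_zero_natCast]
          exact hd.map _
        · simp [Int.toNat_natCast]
      · rw [pvCandEq, hmask]
        exact hcand

-- ===== VERDICT (by name: the statement is the Claim_ definition above) =====
theorem phash_prefix_candidates_py_spec : Claim_equal_phash_prefix_candidates_py := by
  intro p t l _
  unfold Spec_phash_prefix_candidates_py phash_prefix_candidates_py phash_prefix_candidates_py_alt
  by_cases h0 : p = ""
  · simp [h0]
  · simp only [if_neg h0]
    have hmul : (max 1 (min 4 l)) * 4 = 4 * (max 1 (min 4 l)) := by ring
    rw [hmul]
    by_cases hlen : PySem.Str.len (PySem.Str.slice (PySem.Str.lower (PySem.Str.strip p)) none (some (max 1 (min 4 l)))) < max 1 (min 4 l)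
    · simp only [if_pos hlen]
    · simp only [if_neg hlen]
      cases hparse : PySem.Int.ofStrBase? (PySem.Str.slice (PySem.Str.lower (PySem.Str.strip p)) none (some (max 1 (min 4 l)))) 16 with
      | none => rfl
      | some base =>
        by_cases hflip : 4 * (max 1 (min 4 l)) ≤ max 0 (min t (4 * (max 1 (min 4 l))))
        · simp only [if_pos hflip]
        · simp only [if_neg hflip]
          have hnn : (0 : Int) ≤ 4 * (max 1 (min 4 l)) := by positivity
          have hcast : (4 * (max 1 (min 4 l)) : Int) = (((4 * (max 1 (min 4 l))).toNat : Nat) : Int) :=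
            (Int.toNat_of_nonneg hnn).symm
          rw [hcast, pvGenEq]
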